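-- pv_equiv track=rewrite | github.com/karimalami7/MSSD | mssd_spark/topKquery.py | couv_pair
-- ===== SOURCE A (Python) =====
-- from itertools import combinations, product
--
-- def couv_pair(tuple_pair):
--
-- 	# encode subspace by bit shift
-- 	def subspace_encoding(subspace):
-- 		return sum(map(lambda x: 1<<x,subspace))
--
-- 	X=tuple_pair[1]["X"]
-- 	Y=tuple_pair[1]["Y"]
--
-- 	X_comb={ subspace_encoding(subspace) for i in range (1,len(X)+1) for subspace in combinations(X,i) }
-- 	Y_comb={ subspace_encoding(subspace) for i in range (1,len(Y)+1) for subspace in combinations(Y,i) }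
--
-- 	XY_comb={x+y for x,y in product(X_comb,Y_comb)}
--
-- 	return (tuple_pair[0],XY_comb.union(X_comb))
-- ===== SOURCE B (Python) =====
-- def couv_pair(tuple_pair):
--
-- 	X = tuple_pair[1]["X"]
-- 	Y = tuple_pair[1]["Y"]
--
-- 	# Pascal-triangle style DP, built right-to-left: levels[k] holds the bit-encodings
-- 	# of the sub-combinations of size k+1; prepending x merges the x-shifted levels
-- 	# (x alone, then x joined with each smaller level) with the old levels.
-- 	def powenc(A):
-- 		levels = []
-- 		for x in reversed(A):
-- 			b = 1 << x
-- 			shifted = [[b]] + [[b + e for e in lvl] for lvl in levels]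
-- 			levels = [s + old for s, old in zip(shifted, levels + [[]])]
-- 		return [e for lvl in levels for e in lvl]
--
-- 	PX = list(dict.fromkeys(powenc(X)))
-- 	PY = list(dict.fromkeys(powenc(Y)))
--
-- 	return (tuple_pair[0], set([x + y for x in PX for y in PY] + PX))
-- ===== Notes on version B (the rewrite author's own statement) =====
-- stated objective: alternative
-- what changed: B replaces the per-size itertools.combinations/product/set-union pipeline by a Pascal-triangle dynamic program folded right-to-left over the list (a table of per-size encoding levels, no combination tuples ever materialized) and assembles the final set in one pass over a single concatenated list.
import Mathlib
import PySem

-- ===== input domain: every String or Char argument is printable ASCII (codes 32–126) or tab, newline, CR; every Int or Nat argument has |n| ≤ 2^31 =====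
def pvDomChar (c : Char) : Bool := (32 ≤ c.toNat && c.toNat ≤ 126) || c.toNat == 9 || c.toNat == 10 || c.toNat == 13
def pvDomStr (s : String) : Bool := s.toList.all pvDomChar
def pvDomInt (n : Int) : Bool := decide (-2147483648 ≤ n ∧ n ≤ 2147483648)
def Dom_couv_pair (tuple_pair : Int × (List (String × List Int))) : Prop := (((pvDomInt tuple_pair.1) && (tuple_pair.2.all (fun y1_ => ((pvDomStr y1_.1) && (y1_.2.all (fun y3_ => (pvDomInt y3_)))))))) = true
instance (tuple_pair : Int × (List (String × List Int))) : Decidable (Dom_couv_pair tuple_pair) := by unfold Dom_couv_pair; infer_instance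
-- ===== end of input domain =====

-- B replaces the combinations/product/set-union pipeline by a Pascal-triangle dynamic program
-- over per-size encoding levels, folded right-to-left, with one final set over a concatenated
-- list; alternative decomposition, same cost.

-- ===== PORT A =====

-- sum(map(lambda x: 1<<x, subspace))  (exact for 0 ≤ x, which Pre_ guarantees)
def pvEnc (subspace : List Int) : Int :=
  (subspace.map (fun x => ((1 : Int) <<< (x.toNat : Int)))).sum

def couv_pair (tuple_pair : Int × (List (String × List Int))) : Int × List Int :=
  let X := (PySem.Dict.get? ⟨tuple_pair.2⟩ "X").getD []
  let Y := (PySem.Dict.get? ⟨tuple_pair.2⟩ "Y").getD []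
  let X_comb : PySem.Set Int := PySem.Set.ofList
    ((PySem.List.pyRange 1 ((X.length : Int) + 1) 1).flatMap
      (fun i => (PySem.List.combinations X i.toNat).map pvEnc))
  let Y_comb : PySem.Set Int := PySem.Set.ofList
    ((PySem.List.pyRange 1 ((Y.length : Int) + 1) 1).flatMap
      (fun i => (PySem.List.combinations Y i.toNat).map pvEnc))
  let XY_comb : PySem.Set Int := PySem.Set.ofList
    (X_comb.flatMap (fun x => Y_comb.map (fun y => x + y)))
  (tuple_pair.1, PySem.Set.union XY_comb X_comb)

-- ===== PORT B =====

-- one loop iteration: shifted = [[b]] + [[b+e for e in lvl] for lvl in levels];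
-- levels = [s + old for s, old in zip(shifted, levels + [[]])]
def pvStepL (b : Int) (levels : List (List Int)) : List (List Int) :=
  List.zipWith (· ++ ·)
    ([b] :: levels.map (fun lvl => lvl.map (fun e => b + e)))
    (levels ++ [[]])

-- for x in reversed(A): ...
def pvLevels (A : List Int) : List (List Int) :=
  A.reverse.foldl (fun levels x => pvStepL ((1 : Int) <<< (x.toNat : Int)) levels) []

-- [e for lvl in levels for e in lvl]
def pvPowenc (A : List Int) : List Int := (pvLevels A).flatMap id

def couv_pair_alt (tuple_pair : Int × (List (String × List Int))) : Int × List Int :=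
  let X := (PySem.Dict.get? ⟨tuple_pair.2⟩ "X").getD []
  let Y := (PySem.Dict.get? ⟨tuple_pair.2⟩ "Y").getD []
  let PX := PySem.List.dedup (pvPowenc X)
  let PY := PySem.List.dedup (pvPowenc Y)
  (tuple_pair.1,
    PySem.Set.ofList ((PX.flatMap (fun x => PY.map (fun y => x + y))) ++ PX))

-- ===== PRECONDITION & SPEC =====
-- Pre_ excludes inputs where A raises: a missing "X"/"Y" key (KeyError) and negative entries in
-- X or Y (ValueError from 1<<x); duplicate keys are excluded because the argument is a Python
-- dict, which an association list with repeated keys does not represent.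
def Pre_couv_pair (tuple_pair : Int × (List (String × List Int))) : Prop :=
  (PySem.Dict.get? (⟨tuple_pair.2⟩ : PySem.Dict String (List Int)) "X").isSome = true ∧
  (PySem.Dict.get? (⟨tuple_pair.2⟩ : PySem.Dict String (List Int)) "Y").isSome = true ∧
  (tuple_pair.2.map Prod.fst).Nodup ∧
  (∀ x ∈ (PySem.Dict.get? (⟨tuple_pair.2⟩ : PySem.Dict String (List Int)) "X").getD [], 0 ≤ x) ∧
  (∀ y ∈ (PySem.Dict.get? (⟨tuple_pair.2⟩ : PySem.Dict String (List Int)) "Y").getD [], 0 ≤ y)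
instance (tuple_pair : Int × (List (String × List Int))) : Decidable (Pre_couv_pair tuple_pair) := by unfold Pre_couv_pair; infer_instance

def pvWitness_couv_pair : (Int × (List (String × List Int))) := (7, [("X", [0, 2]), ("Y", [1])])

def Spec_couv_pair (tuple_pair : Int × (List (String × List Int))) (out : Int × List Int) : Prop := out = couv_pair_alt tuple_pair
instance (tuple_pair : Int × (List (String × List Int))) (out : Int × List Int) : Decidable (Spec_couv_pair tuple_pair out) := by unfold Spec_couv_pair; infer_instance

-- ===== CLAIM (what is proved, stated in full; the proofs are below) =====
def Claim_equal_couv_pair : Prop := ∀ (tuple_pair : Int × (List (String × List Int))), Dom_couv_pair tuple_pair → Pre_couv_pair tuple_pair → Spec_couv_pair tuple_pair (couv_pair tuple_pair)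

-- ===== LEMMAS AND PROOFS =====

-- combinations of size above the length are empty
theorem pvComb_nil_of_lt (A : List Int) (r : Nat) (h : A.length < r) :
    PySem.List.combinations A r = [] := by
  induction A generalizing r with
  | nil =>
      cases r with
      | zero => omega
      | succ r => exact PySem.List.combinations_nil_succ r
  | cons x xs ih =>
      cases r with
      | zero => simp at h
      | succ r =>
          rw [PySem.List.combinations_cons_succ]
          simp at h
          rw [ih r (by omega), ih (r + 1) (by omega)]
          simp

-- per-size encoding levels of A
def pvLvl (A : List Int) (k : Nat) : List Int :=
  (PySem.List.combinations A k).map pvEnc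

theorem pvLvl_zero (A : List Int) : pvLvl A 0 = [0] := by
  simp [pvLvl, PySem.List.combinations_zero, pvEnc]

theorem pvLvl_cons (x : Int) (A : List Int) (k : Nat) :
    pvLvl (x :: A) (k + 1)
      = (pvLvl A k).map (fun e => (1 : Int) <<< (x.toNat : Int) + e) ++ pvLvl A (k + 1) := by
  simp only [pvLvl, PySem.List.combinations_cons_succ, List.map_append, List.map_map]
  congr 1


-- zipWith (++) of two maps over the same list
theorem pvZip_map {α : Type} (F G : α → List Int) (l : List α) :
    List.zipWith (· ++ ·) (l.map F) (l.map G) = l.map (fun k => F k ++ G k) := by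
  induction l with
  | nil => rfl
  | cons a l ih => simp [ih]

-- the DP levels are exactly the per-size combination encodings
theorem pvLevels_eq (A : List Int) :
    pvLevels A = (List.range A.length).map (fun k => pvLvl A (k + 1)) := by
  induction A with
  | nil => rfl
  | cons x A ih =>
      have hstep : pvLevels (x :: A)
          = pvStepL ((1 : Int) <<< (x.toNat : Int)) (pvLevels A) := by
        simp [pvLevels, List.foldl_append]
      rw [hstep, ih]
      set b : Int := (1 : Int) <<< (x.toNat : Int) with hb
      set n := A.length with hn
      have h1 : [b] :: ((List.range n).map (fun k => pvLvl A (k + 1))).map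
            (fun lvl => lvl.map (fun e => b + e))
          = (List.range (n + 1)).map (fun k => (pvLvl A k).map (fun e => b + e)) := by
        rw [List.range_succ_eq_map]
        simp [List.map_map, Function.comp, pvLvl_zero]
      have h2 : (List.range n).map (fun k => pvLvl A (k + 1)) ++ [[]]
          = (List.range (n + 1)).map (fun k => pvLvl A (k + 1)) := by
        rw [List.range_succ, List.map_append]
        simp [pvLvl, pvComb_nil_of_lt A (n + 1) (by omega)]
      rw [pvStepL, h1, h2, pvZip_map]
      apply List.map_congr_left
      intro k _
      rw [pvLvl_cons]

-- the flattened DP equals A's range/combinations enumeration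
theorem pvPowenc_eq (A : List Int) :
    pvPowenc A
      = (PySem.List.pyRange 1 ((A.length : Int) + 1) 1).flatMap
          (fun i => (PySem.List.combinations A i.toNat).map pvEnc) := by
  unfold pvPowenc
  rw [pvLevels_eq, PySem.List.pyRange_one]
  have hlen : (((A.length : Int) + 1) - 1).toNat = A.length := by omega
  rw [hlen, List.flatMap_map, List.flatMap_map]
  apply List.flatMap_congr
  intro k _
  have h : ((1 : Int) + (k : Int)).toNat = 1 + k := by omega
  rw [id, h, pvLvl, Nat.add_comm]

theorem pvSets_eq (prods xc : List Int) :
    PySem.Set.ofList (prods ++ xc)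
      = PySem.Set.union (PySem.Set.ofList prods) xc := by
  rw [PySem.Set.ofList_append]
  rfl

-- ===== VERDICT (by name: the statement is the Claim_ definition above) =====
theorem couv_pair_spec : Claim_equal_couv_pair := by
  intro tp _ _
  simp only [Spec_couv_pair, couv_pair, couv_pair_alt, pvPowenc_eq,
    PySem.List.dedup_eq_ofList, pvSets_eq]
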